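-- pv_equiv track=rewrite | github.com/shenyr/law_AI | tfidf.py | keywords_num
-- ===== SOURCE A (Python) =====
-- def keywords_num(rows_dict):
--     keywords = []
--     for key in rows_dict.keys():
--         for key_key in rows_dict[key].keys():
--             if key_key in keywords:
--                 pass
--             else:
--                 keywords.append(key_key)
--     keywords_num_dict = dict()
--     for i in range(0,len(keywords)):
--         keyword = keywords[i]
--         keywords_num_dict[keyword] = i+1
--     return(keywords_num_dict)
-- ===== SOURCE B (Python) =====
-- def keywords_num(rows_dict):
--     # Record each inner key's first global position in the key stream,
--     # then rank the keys by that position (1-based).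
--     first_pos = {}
--     pos = 0
--     for inner in rows_dict.values():
--         for k in inner:
--             first_pos.setdefault(k, pos)
--             pos += 1
--     ranked = sorted(first_pos.items(), key=lambda kv: kv[1])
--     return {kv[0]: i + 1 for i, kv in enumerate(ranked)}
-- ===== Notes on version B (the rewrite author's own statement) =====
-- stated objective: faster
-- what changed: B records each key's first global position in the key stream via setdefault, then ranks the keys by sorting on that position and enumerating, instead of A's list-membership dedup pass followed by a range-indexed numbering loop.
import Mathlib
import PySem

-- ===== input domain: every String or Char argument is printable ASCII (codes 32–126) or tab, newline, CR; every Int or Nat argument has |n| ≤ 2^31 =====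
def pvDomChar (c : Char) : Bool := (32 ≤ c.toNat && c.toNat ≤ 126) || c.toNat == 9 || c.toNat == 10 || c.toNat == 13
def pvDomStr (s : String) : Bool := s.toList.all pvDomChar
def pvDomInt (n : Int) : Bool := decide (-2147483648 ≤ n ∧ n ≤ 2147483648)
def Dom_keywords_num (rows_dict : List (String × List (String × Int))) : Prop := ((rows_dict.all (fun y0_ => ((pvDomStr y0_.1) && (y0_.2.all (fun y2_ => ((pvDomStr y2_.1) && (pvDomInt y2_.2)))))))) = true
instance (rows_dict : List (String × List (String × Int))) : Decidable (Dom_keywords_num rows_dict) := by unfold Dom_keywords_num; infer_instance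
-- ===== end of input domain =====

-- B ranks keys by their first global position in the key stream (setdefault + sort + enumerate)
-- instead of A's list-dedup pass and range-numbering loop; return value only, no mutation either side.

-- ===== PORT A =====
def keywords_num (rows_dict : List (String × List (String × Int))) : List (String × Int) :=
  let d := PySem.Dict.ofList rows_dict
  let keywords : List String :=
    d.keys.foldl (fun kws key =>
      (PySem.Dict.ofList (d.getD key [])).keys.foldl
        (fun kws kk => if kk ∈ kws then kws else kws ++ [kk]) kws) []
  let nd : PySem.Dict String Int :=
    (PySem.List.pyRange 0 (keywords.length : Int) 1).foldl
      (fun nd i => nd.insert (PySem.List.pyGetD keywords i "") (i + 1)) PySem.Dict.empty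
  nd.items

-- ===== PORT B =====
def keywords_num_alt (rows_dict : List (String × List (String × Int))) : List (String × Int) :=
  let d := PySem.Dict.ofList rows_dict
  let st := d.values.foldl (fun (st : PySem.Dict String Int × Int) inner =>
      (PySem.Dict.ofList inner).keys.foldl
        (fun st k => ((if st.1.contains k then st.1 else st.1.insert k st.2), st.2 + 1)) st)
    (PySem.Dict.empty, 0)
  let ranked := PySem.List.sorted st.1.items (fun kv => kv.2) false
  ((PySem.List.enumerate ranked 0).foldl
      (fun out p => out.insert p.2.1 (p.1 + 1)) PySem.Dict.empty).items

-- ===== PRECONDITION & SPEC =====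
def Spec_keywords_num (rows_dict : List (String × List (String × Int))) (out : List (String × Int)) : Prop := out = keywords_num_alt rows_dict
instance (rows_dict : List (String × List (String × Int))) (out : List (String × Int)) : Decidable (Spec_keywords_num rows_dict out) := by unfold Spec_keywords_num; infer_instance

-- ===== CLAIM (what is proved, stated in full; the proofs are below) =====
def Claim_equal_keywords_num : Prop := ∀ (rows_dict : List (String × List (String × Int))), Dom_keywords_num rows_dict → Spec_keywords_num rows_dict (keywords_num rows_dict)

-- ===== LEMMAS AND PROOFS =====

-- keywords list numbered 1..n as an items list
def pvNumbered (kws : List String) : List (String × Int) :=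
  (PySem.List.enumerate kws 0).map (fun p => (p.2, p.1 + 1))

theorem pvNumbered_eq_enum_items (l : List (String × Int)) (s : Int) :
    (PySem.List.enumerate l s).map (fun p => (p.2.1, p.1 + 1))
      = (PySem.List.enumerate (l.map Prod.fst) s).map (fun p => (p.2, p.1 + 1)) := by
  induction l generalizing s with
  | nil => simp [PySem.List.enumerate_nil]
  | cons x xs ih => simp [PySem.List.enumerate_cons, ih]

-- B's first-pass invariant: the dict's items have exactly A's dedup keys, with
-- strictly increasing positions all below the running counter
theorem pv_innerB (ks : List String) (fp : List (String × Int)) (pos : Int)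
    (hnd : (fp.map Prod.fst).Nodup) (hpw : (fp.map Prod.snd).Pairwise (· < ·))
    (hlt : ∀ p ∈ fp, p.2 < pos) :
    ∃ fp' pos',
      ks.foldl (fun st k => ((if st.1.contains k then st.1 else st.1.insert k st.2), st.2 + 1))
          (PySem.Dict.mk fp, pos) = (PySem.Dict.mk fp', pos')
      ∧ fp'.map Prod.fst = ks.foldl (fun kws kk => if kk ∈ kws then kws else kws ++ [kk]) (fp.map Prod.fst)
      ∧ (fp'.map Prod.fst).Nodup ∧ (fp'.map Prod.snd).Pairwise (· < ·)
      ∧ (∀ p ∈ fp', p.2 < pos') := by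
  induction ks generalizing fp pos with
  | nil => exact ⟨fp, pos, rfl, rfl, hnd, hpw, hlt⟩
  | cons k ks ih =>
    have hcont : (PySem.Dict.mk fp).contains k = decide (k ∈ fp.map Prod.fst) := by
      rw [PySem.Dict.contains_eq_decide_mem_keys]; rfl
    by_cases hk : k ∈ fp.map Prod.fst
    · have hlt' : ∀ p ∈ fp, p.2 < pos + 1 := fun p hp => lt_trans (hlt p hp) (by omega)
      obtain ⟨fp', pos', h1, h2, h3, h4, h5⟩ := ih fp (pos + 1) hnd hpw hlt'
      exact ⟨fp', pos', by simpa [List.foldl_cons, hcont, hk] using h1,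
        by simpa [hk] using h2, h3, h4, h5⟩
    · have hins : (PySem.Dict.mk fp).insert k pos = PySem.Dict.mk (fp ++ [(k, pos)]) := by
        apply PySem.Dict.ext
        rw [PySem.Dict.items_insert_of_not_contains _ pos (by simp [hcont, hk])]
      have hnd' : ((fp ++ [(k, pos)]).map Prod.fst).Nodup := by
        simp only [List.map_append, List.map_cons, List.map_nil, List.nodup_append]
        refine ⟨hnd, List.nodup_singleton _, ?_⟩
        intro a ha b hb
        simp only [List.mem_singleton] at hb
        subst hb
        exact fun h => hk (h ▸ ha)
      have hpw' : ((fp ++ [(k, pos)]).map Prod.snd).Pairwise (· < ·) := by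
        simp only [List.map_append, List.map_cons, List.map_nil]
        rw [List.pairwise_append]
        refine ⟨hpw, List.pairwise_singleton _ _, ?_⟩
        intro a ha b hb
        simp at hb
        obtain ⟨p, hp, rfl⟩ := List.mem_map.mp ha
        exact hb ▸ hlt p hp
      have hlt' : ∀ p ∈ fp ++ [(k, pos)], p.2 < pos + 1 := by
        intro p hp
        rcases List.mem_append.mp hp with h | h
        · exact lt_trans (hlt p h) (by omega)
        · simp at h; simp [h]
      obtain ⟨fp', pos', h1, h2, h3, h4, h5⟩ := ih (fp ++ [(k, pos)]) (pos + 1) hnd' hpw' hlt'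
      refine ⟨fp', pos', by simpa [List.foldl_cons, hcont, hk, hins] using h1, ?_, h3, h4, h5⟩
      simpa [hk] using h2

-- outer loop over all inner key-lists, same invariant
theorem pv_outerB (LS : List (List String)) (fp : List (String × Int)) (pos : Int)
    (hnd : (fp.map Prod.fst).Nodup) (hpw : (fp.map Prod.snd).Pairwise (· < ·))
    (hlt : ∀ p ∈ fp, p.2 < pos) :
    ∃ fp' pos',
      LS.foldl (fun st ks => ks.foldl
          (fun st k => ((if st.1.contains k then st.1 else st.1.insert k st.2), st.2 + 1)) st)
          (PySem.Dict.mk fp, pos) = (PySem.Dict.mk fp', pos')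
      ∧ fp'.map Prod.fst = LS.foldl (fun kws ks =>
          ks.foldl (fun kws kk => if kk ∈ kws then kws else kws ++ [kk]) kws) (fp.map Prod.fst)
      ∧ (fp'.map Prod.fst).Nodup ∧ (fp'.map Prod.snd).Pairwise (· < ·)
      ∧ (∀ p ∈ fp', p.2 < pos') := by
  induction LS generalizing fp pos with
  | nil => exact ⟨fp, pos, rfl, rfl, hnd, hpw, hlt⟩
  | cons ks LS ih =>
    obtain ⟨fp1, pos1, h1, h2, h3, h4, h5⟩ := pv_innerB ks fp pos hnd hpw hlt
    obtain ⟨fp', pos', g1, g2, g3, g4, g5⟩ := ih fp1 pos1 h3 h4 h5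
    exact ⟨fp', pos', by simp only [List.foldl_cons, h1]; exact g1,
      by rw [g2, h2]; rfl, g3, g4, g5⟩

-- A's second phase = numbering the dedup list
theorem pv_phase2 (kws : List String) (hnd : kws.Nodup) :
    (PySem.List.pyRange 0 (kws.length : Int) 1).foldl
      (fun nd i => nd.insert (PySem.List.pyGetD kws i "") (i + 1)) PySem.Dict.empty
    = PySem.Dict.mk (pvNumbered kws) := by
  have henum := PySem.List.enumerate_eq_map_pyRange kws ""
  have h1 : (PySem.List.pyRange 0 (kws.length : Int) 1).foldl
      (fun nd i => nd.insert (PySem.List.pyGetD kws i "") (i + 1)) PySem.Dict.empty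
      = (PySem.List.enumerate kws 0).foldl
          (fun nd p => nd.insert p.2 (p.1 + 1)) PySem.Dict.empty := by
    rw [henum, List.foldl_map]
    rfl
  rw [h1]
  apply PySem.Dict.ext
  rw [PySem.Dict.items_foldl_insert_fresh]
  · simp [pvNumbered]
    rfl
  · intro a _; simp [PySem.Dict.contains_empty]
  · rw [PySem.List.map_snd_enumerate]; exact hnd

-- ===== VERDICT (by name: the statement is the Claim_ definition above) =====
theorem keywords_num_spec : Claim_equal_keywords_num := by
  intro rows_dict _
  unfold Spec_keywords_num keywords_num keywords_num_alt
  set d := PySem.Dict.ofList rows_dict with hd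
  have hvals : d.keys.map (fun key => d.getD key []) = d.values := by
    exact (PySem.Dict.values_eq_map_keys d (PySem.Dict.nodup_keys_ofList rows_dict) []).symm
  set LS := d.values.map (fun inner => (PySem.Dict.ofList inner).keys) with hLS
  -- A's phase-1 fold as a fold over LS
  have hkw :
      d.keys.foldl (fun kws key =>
        (PySem.Dict.ofList (d.getD key [])).keys.foldl
          (fun kws kk => if kk ∈ kws then kws else kws ++ [kk]) kws) []
      = LS.foldl (fun kws ks =>
          ks.foldl (fun kws kk => if kk ∈ kws then kws else kws ++ [kk]) kws) [] := by
    rw [hLS, List.foldl_map, ← hvals, List.foldl_map]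
  -- B's first pass as a fold over LS
  have hB :
      d.values.foldl (fun (st : PySem.Dict String Int × Int) inner =>
        (PySem.Dict.ofList inner).keys.foldl
          (fun st k => ((if st.1.contains k then st.1 else st.1.insert k st.2), st.2 + 1)) st)
        (PySem.Dict.empty, 0)
      = LS.foldl (fun st ks => ks.foldl
          (fun st k => ((if st.1.contains k then st.1 else st.1.insert k st.2), st.2 + 1)) st)
          (PySem.Dict.empty, 0) := by
    rw [hLS, List.foldl_map]
  obtain ⟨fp, pos, h1, h2, h3, h4, _⟩ :=
    pv_outerB LS [] 0 List.nodup_nil List.Pairwise.nil (by simp)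
  have hempty : ((PySem.Dict.empty : PySem.Dict String Int), (0 : Int))
      = (PySem.Dict.mk [], 0) := rfl
  set kws := LS.foldl (fun kws ks =>
      ks.foldl (fun kws kk => if kk ∈ kws then kws else kws ++ [kk]) kws) [] with hkws
  have hfpkeys : fp.map Prod.fst = kws := by simpa using h2
  -- B's sort is the identity: positions strictly increase along the items
  have hsorted : PySem.List.sorted (PySem.Dict.mk fp).items (fun kv => kv.2) false = fp := by
    have : (PySem.Dict.mk fp).items = fp := rfl
    rw [this]
    apply PySem.List.sorted_eq_self_of_pairwise
    have := (List.pairwise_map.mp h4)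
    exact this.imp (fun h => le_of_lt h)
  -- B's final comprehension numbers fp's keys 1..n
  have hfinal :
      ((PySem.List.enumerate fp 0).foldl
        (fun out p => out.insert p.2.1 (p.1 + 1)) PySem.Dict.empty).items
      = pvNumbered kws := by
    rw [PySem.Dict.items_foldl_insert_fresh]
    · have he : (PySem.Dict.empty : PySem.Dict String Int).items = [] := rfl
      rw [he, List.nil_append, pvNumbered_eq_enum_items, hfpkeys]; rfl
    · intro a _; simp [PySem.Dict.contains_empty]
    · have : (PySem.List.enumerate fp 0).map (fun p => p.2.1)
          = ((PySem.List.enumerate fp 0).map Prod.snd).map Prod.fst := by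
        rw [List.map_map]; rfl
      rw [this, PySem.List.map_snd_enumerate, hfpkeys]
      exact hfpkeys ▸ h3
  simp only [hkw]
  rw [pv_phase2 kws (hfpkeys ▸ h3), hB, hempty, h1, hsorted, hfinal]
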